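-- pv_equiv track=rewrite | github.com/eroge-69/PyToExe | python-files/Обработчик нестингаV4.py | remove_initial_commands
-- ===== SOURCE A (Python) =====
-- def remove_initial_commands(content):
--     """Удаление начальных команд N10-N40 для всех файлов"""
--     filtered_lines = []
--     skip_initial = True
--
--     for line in content.split('\n'):
--         line_stripped = line.strip()
--
--         # Пропускаем начальные команды N10-N40
--         if skip_initial and any(line_stripped.startswith(f'N{i}') for i in range(10, 50, 10)):
--             continue
--         else:
--             skip_initial = False
--             filtered_lines.append(line)
--
--     return filtered_lines
-- ===== SOURCE B (Python) =====
-- def remove_initial_commands(content):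
--     """Удаление начальных команд N10-N40 для всех файлов"""
--     lines = content.split('\n')
--     for i, line in enumerate(lines):
--         if not line.strip().startswith(('N10', 'N20', 'N30', 'N40')):
--             return lines[i:]
--     return []
-- ===== Notes on version B (the rewrite author's own statement) =====
-- stated objective: simpler
-- what changed: B drops A's skip_initial flag and accumulator list: it scans the split lines once with enumerate to find the first line whose stripped value does not start with N10/N20/N30/N40 and returns the suffix slice from there.
import Mathlib
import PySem

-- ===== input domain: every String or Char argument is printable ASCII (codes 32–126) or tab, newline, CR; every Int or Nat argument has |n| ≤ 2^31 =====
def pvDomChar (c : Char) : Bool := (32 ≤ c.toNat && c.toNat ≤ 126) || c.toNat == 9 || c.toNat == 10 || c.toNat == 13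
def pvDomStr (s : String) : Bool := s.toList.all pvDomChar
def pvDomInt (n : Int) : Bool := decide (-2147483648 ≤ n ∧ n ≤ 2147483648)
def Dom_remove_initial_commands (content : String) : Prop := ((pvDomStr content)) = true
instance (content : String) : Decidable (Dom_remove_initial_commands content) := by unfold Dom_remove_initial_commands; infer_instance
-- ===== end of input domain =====

-- B replaces A's skip_initial flag and accumulator with find-first-non-matching-index then suffix slice (same result, simpler decomposition).

-- ===== PORT A =====
-- any(line_stripped.startswith(f'N{i}') for i in range(10, 50, 10))
def pvPredA (line : String) : Bool :=
  (PySem.List.pyRange 10 50 10).any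
    (fun i => PySem.Str.startswith (PySem.Str.strip line) ("N" ++ PySem.Int.toStr i))

def remove_initial_commands (content : String) : List String :=
  let r := ((PySem.Str.split? content "\n").getD []).foldl
    (fun (st : List String × Bool) line =>
      if st.2 && pvPredA line then st
      else (st.1 ++ [line], false))
    ([], true)
  r.1

-- ===== PORT B =====
-- not line.strip().startswith(('N10','N20','N30','N40'))
def pvPredB (line : String) : Bool :=
  let s := PySem.Str.strip line
  PySem.Str.startswith s "N10" || PySem.Str.startswith s "N20" ||
  PySem.Str.startswith s "N30" || PySem.Str.startswith s "N40"

-- scan for the first index whose line fails the predicate, return the suffix from there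
def pvSuffixB : List String → List String
  | [] => []
  | l :: ls => if pvPredB l then pvSuffixB ls else l :: ls

def remove_initial_commands_alt (content : String) : List String :=
  pvSuffixB ((PySem.Str.split? content "\n").getD [])

-- ===== PRECONDITION & SPEC =====
def Spec_remove_initial_commands (content : String) (out : List String) : Prop := out = remove_initial_commands_alt content
instance (content : String) (out : List String) : Decidable (Spec_remove_initial_commands content out) := by unfold Spec_remove_initial_commands; infer_instance

-- ===== CLAIM (what is proved, stated in full; the proofs are below) =====
def Claim_equal_remove_initial_commands : Prop := ∀ (content : String), Dom_remove_initial_commands content → Spec_remove_initial_commands content (remove_initial_commands content)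

-- ===== LEMMAS AND PROOFS =====

theorem pvPred_eq (line : String) : pvPredA line = pvPredB line := by
  simp only [pvPredA, pvPredB,
    show PySem.List.pyRange 10 50 10 = [10, 20, 30, 40] from by decide,
    show PySem.Int.toStr 10 = "10" from by decide,
    show PySem.Int.toStr 20 = "20" from by decide,
    show PySem.Int.toStr 30 = "30" from by decide,
    show PySem.Int.toStr 40 = "40" from by decide,
    List.any_cons, List.any_nil]
  simp [Bool.or_assoc]

theorem pv_foldl_false (lines : List String) (acc : List String) :
    (lines.foldl
      (fun (st : List String × Bool) line =>
        if st.2 && pvPredA line then st else (st.1 ++ [line], false))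
      (acc, false)).1 = acc ++ lines := by
  induction lines generalizing acc with
  | nil => simp
  | cons l ls ih =>
    rw [List.foldl_cons]
    rw [show (if ((false : Bool) && pvPredA l) = true then ((acc, false) : List String × Bool)
          else (acc ++ [l], false)) = (acc ++ [l], false) from by simp]
    rw [ih]; simp

theorem pv_foldl_true (lines : List String) (acc : List String) :
    (lines.foldl
      (fun (st : List String × Bool) line =>
        if st.2 && pvPredA line then st else (st.1 ++ [line], false))
      (acc, true)).1 = acc ++ pvSuffixB lines := by
  induction lines generalizing acc with
  | nil => simp [pvSuffixB]
  | cons l ls ih =>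
    rw [List.foldl_cons]
    by_cases h : pvPredA l
    · rw [show (if ((true : Bool) && pvPredA l) = true then ((acc, true) : List String × Bool)
            else (acc ++ [l], false)) = (acc, true) from by simp [h]]
      rw [ih]
      have hb : pvPredB l = true := (pvPred_eq l) ▸ h
      simp [pvSuffixB, hb]
    · rw [show (if ((true : Bool) && pvPredA l) = true then ((acc, true) : List String × Bool)
            else (acc ++ [l], false)) = (acc ++ [l], false) from by simp [h]]
      rw [pv_foldl_false]
      have hb : pvPredB l = false := by rw [← pvPred_eq]; exact Bool.eq_false_iff.mpr h
      simp [pvSuffixB, hb]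

-- ===== VERDICT (by name: the statement is the Claim_ definition above) =====
theorem remove_initial_commands_spec : Claim_equal_remove_initial_commands := by
  intro content _
  unfold Spec_remove_initial_commands remove_initial_commands remove_initial_commands_alt
  simpa using pv_foldl_true ((PySem.Str.split? content "\n").getD []) []
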